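-- pv_equiv track=rewrite | github.com/The1stRule/GOA-homeworks | day 0039/homework/homework.py | memesorting
-- ===== SOURCE A (Python) =====
-- def memesorting(meme):
--     st = ""
--     chemistry = ""
--     design = ""
--     index = 0
--     index_1 = 0
--     index_2 = 0
--     for i in meme.lower():
--         if len("bug") != index and i == "bug"[index]:
--             st += i
--             index += 1
--         if len("boom") != index_1 and i == "boom"[index_1]:
--             chemistry += i
--             index_1 += 1
--         if len("edits") != index_2 and i == "edits"[index_2]:
--             design += i
--             index_2 += 1
--         if st == "bug":
--             return "Roma"
--         elif chemistry == "boom":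
--             return "Maxim"
--         elif design == "edits":
--             return "Danik"
--     return "Vlad"
-- ===== SOURCE B (Python) =====
-- def memesorting(meme):
--     def done_at(s, pat):
--         k = 0
--         for i, c in enumerate(s):
--             if c == pat[k]:
--                 k += 1
--                 if k == len(pat):
--                     return i
--         return None
--
--     s = meme.lower()
--     best = None
--     name = "Vlad"
--     for pat, who in (("bug", "Roma"), ("boom", "Maxim"), ("edits", "Danik")):
--         d = done_at(s, pat)
--         if d is not None and (best is None or d < best):
--             best, name = d, who
--     return name
-- ===== Notes on version B (the rewrite author's own statement) =====
-- stated objective: simpler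
-- what changed: Replaces the single interleaved three-pointer scan with three independent per-pattern subsequence-completion scans followed by a strict-min comparison of completion indices (pattern order breaks ties).
import Mathlib
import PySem

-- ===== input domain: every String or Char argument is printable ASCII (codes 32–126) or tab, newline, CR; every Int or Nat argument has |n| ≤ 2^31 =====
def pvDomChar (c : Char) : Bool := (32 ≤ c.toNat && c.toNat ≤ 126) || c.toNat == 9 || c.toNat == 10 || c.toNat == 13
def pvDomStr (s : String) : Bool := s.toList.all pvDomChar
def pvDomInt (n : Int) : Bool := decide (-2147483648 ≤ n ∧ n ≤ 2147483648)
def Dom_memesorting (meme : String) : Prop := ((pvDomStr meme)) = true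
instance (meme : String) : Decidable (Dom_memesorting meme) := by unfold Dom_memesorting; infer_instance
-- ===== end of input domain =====

-- B replaces A's interleaved three-pointer scan by three independent per-pattern
-- completion scans plus a strict-min comparison of completion indices (simpler decomposition).

-- ===== PORT A =====
-- state: st/chemistry/design as char lists, the three match pointers; early return via recursion.
-- "bug"[index] is guarded in range by "len ≠ index", so List.getD is exact there.
def memALoop : List Char → List Char → List Char → List Char → Nat → Nat → Nat → String
  | [], _, _, _, _, _, _ => "Vlad"
  | c :: rest, st, ch, de, i0, i1, i2 =>
    let p0 := ['b','u','g']
    let p1 := ['b','o','o','m']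
    let p2 := ['e','d','i','t','s']
    let st' := if 3 ≠ i0 ∧ c = p0.getD i0 ' ' then st ++ [c] else st
    let i0' := if 3 ≠ i0 ∧ c = p0.getD i0 ' ' then i0 + 1 else i0
    let ch' := if 4 ≠ i1 ∧ c = p1.getD i1 ' ' then ch ++ [c] else ch
    let i1' := if 4 ≠ i1 ∧ c = p1.getD i1 ' ' then i1 + 1 else i1
    let de' := if 5 ≠ i2 ∧ c = p2.getD i2 ' ' then de ++ [c] else de
    let i2' := if 5 ≠ i2 ∧ c = p2.getD i2 ' ' then i2 + 1 else i2
    if st' = p0 then "Roma"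
    else if ch' = p1 then "Maxim"
    else if de' = p2 then "Danik"
    else memALoop rest st' ch' de' i0' i1' i2'

def memesorting (meme : String) : String :=
  memALoop (PySem.Str.lower meme).toList [] [] [] 0 0 0

-- ===== PORT B =====
-- done_at: scan with enumerate index pos and match pointer k; return index at completion.
def doneAt (pos : Nat) (s : List Char) (pat : List Char) (k : Nat) : Option Nat :=
  match s with
  | [] => none
  | c :: rest =>
    if c = pat.getD k ' ' then
      (if k + 1 = pat.length then some pos else doneAt (pos + 1) rest pat (k + 1))
    else doneAt (pos + 1) rest pat k

-- one iteration of B's selection loop: keep candidate with strictly smaller completion index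
def bStep (acc : Option Nat × String) (d : Option Nat) (who : String) : Option Nat × String :=
  match d with
  | none => acc
  | some x =>
    match acc.1 with
    | none => (some x, who)
    | some b => if x < b then (some x, who) else acc

def memesorting_alt (meme : String) : String :=
  let s := (PySem.Str.lower meme).toList
  let acc := bStep (bStep (bStep (none, "Vlad") (doneAt 0 s ['b','u','g'] 0) "Roma")
    (doneAt 0 s ['b','o','o','m'] 0) "Maxim") (doneAt 0 s ['e','d','i','t','s'] 0) "Danik"
  acc.2

-- ===== PRECONDITION & SPEC =====
def Spec_memesorting (meme : String) (out : String) : Prop := out = memesorting_alt meme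
instance (meme : String) (out : String) : Decidable (Spec_memesorting meme out) := by unfold Spec_memesorting; infer_instance

-- ===== CLAIM (what is proved, stated in full; the proofs are below) =====
def Claim_equal_memesorting : Prop := ∀ (meme : String), Dom_memesorting meme → Spec_memesorting meme (memesorting meme)

-- ===== LEMMAS AND PROOFS =====

-- B's selection result from the three completion indices
def pick (a b c : Option Nat) : String :=
  (bStep (bStep (bStep (none, "Vlad") a "Roma") b "Maxim") c "Danik").2

theorem doneAt_ge {pos : Nat} {s pat : List Char} {k x : Nat}
    (h : doneAt pos s pat k = some x) : pos ≤ x := by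
  induction s generalizing pos k with
  | nil => simp [doneAt] at h
  | cons c rest ih =>
    unfold doneAt at h
    split_ifs at h with h1 h2
    · exact (Option.some.injEq ..).mp h ▸ le_refl _
    · exact Nat.le_of_succ_le (ih h)
    · exact Nat.le_of_succ_le (ih h)

-- if a completes exactly at pos and the others complete no earlier than pos (or never), Roma wins
theorem pick_roma {b c : Option Nat} {pos : Nat}
    (hb : ∀ x, b = some x → pos ≤ x) (hc : ∀ x, c = some x → pos ≤ x) :
    pick (some pos) b c = "Roma" := by
  cases b with
  | none =>
    cases c with
    | none => rfl
    | some y => have := hc y rfl; simp [pick, bStep, Nat.not_lt.mpr this]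
  | some x =>
    have hx := hb x rfl
    cases c with
    | none => simp [pick, bStep, Nat.not_lt.mpr hx]
    | some y =>
      have hy := hc y rfl
      simp [pick, bStep, Nat.not_lt.mpr hx, Nat.not_lt.mpr hy]

theorem pick_maxim {a c : Option Nat} {pos : Nat}
    (ha : ∀ x, a = some x → pos < x) (hc : ∀ x, c = some x → pos ≤ x) :
    pick a (some pos) c = "Maxim" := by
  cases a with
  | none =>
    cases c with
    | none => rfl
    | some y => have := hc y rfl; simp [pick, bStep, Nat.not_lt.mpr this]
  | some x =>
    have hx := ha x rfl
    cases c with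
    | none => simp [pick, bStep, hx]
    | some y =>
      have hy := hc y rfl
      simp [pick, bStep, hx, Nat.not_lt.mpr hy]

theorem pick_danik {a b : Option Nat} {pos : Nat}
    (ha : ∀ x, a = some x → pos < x) (hb : ∀ x, b = some x → pos < x) :
    pick a b (some pos) = "Danik" := by
  cases a with
  | none =>
    cases b with
    | none => rfl
    | some y => have := hb y rfl; simp [pick, bStep, this]
  | some x =>
    have hx := ha x rfl
    cases b with
    | none => simp [pick, bStep, hx]
    | some y =>
      have hy := hb y rfl
      by_cases hxy : y < x <;> simp [pick, bStep, hx, hy, hxy]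

-- matched-so-far characters are exactly the first k pattern characters
theorem take_succ_eq {pat : List Char} {k : Nat} (hk : k < pat.length) :
    pat.take (k + 1) = pat.take k ++ [pat.getD k ' '] := by
  rw [List.getD_eq_getElem _ _ hk, ← List.take_concat_get' pat k hk]

theorem take_ne {pat : List Char} {k : Nat} (hk : k < pat.length) :
    pat.take k ≠ pat := by
  intro heq
  have := congrArg List.length heq
  simp [Nat.min_eq_left (Nat.le_of_lt hk)] at this
  omega

theorem doneAt_cons_complete {c : Char} {rest pat : List Char} {pos k : Nat}
    (h : c = pat.getD k ' ') (hl : k + 1 = pat.length) :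
    doneAt pos (c :: rest) pat k = some pos := by
  unfold doneAt; rw [if_pos h, if_pos hl]

theorem doneAt_cons_match {c : Char} {rest pat : List Char} {pos k : Nat}
    (h : c = pat.getD k ' ') (hl : ¬ k + 1 = pat.length) :
    doneAt pos (c :: rest) pat k = doneAt (pos + 1) rest pat (k + 1) := by
  conv_lhs => unfold doneAt
  rw [if_pos h, if_neg hl]

theorem doneAt_cons_nomatch {c : Char} {rest pat : List Char} {pos k : Nat}
    (h : ¬ c = pat.getD k ' ') :
    doneAt pos (c :: rest) pat k = doneAt (pos + 1) rest pat k := by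
  conv_lhs => unfold doneAt
  rw [if_neg h]

theorem doneAt_cons_strict {c : Char} {rest pat : List Char} {pos k x : Nat}
    (h : ¬ (c = pat.getD k ' ' ∧ k + 1 = pat.length))
    (hx : doneAt pos (c :: rest) pat k = some x) : pos < x := by
  unfold doneAt at hx
  split_ifs at hx with h1 h2
  · exact absurd ⟨h1, h2⟩ h
  · exact doneAt_ge hx
  · exact doneAt_ge hx

-- key invariant: A's loop from a consistent intermediate state equals B's min-pick on
-- the three completion scans of the remaining characters
theorem memALoop_eq_pick (s : List Char) : ∀ (pos i0 i1 i2 : Nat),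
    i0 < 3 → i1 < 4 → i2 < 5 →
    memALoop s (['b','u','g'].take i0) (['b','o','o','m'].take i1)
      (['e','d','i','t','s'].take i2) i0 i1 i2 =
    pick (doneAt pos s ['b','u','g'] i0) (doneAt pos s ['b','o','o','m'] i1)
      (doneAt pos s ['e','d','i','t','s'] i2) := by
  induction s with
  | nil => intro pos i0 i1 i2 _ _ _; rfl
  | cons c rest ih =>
    intro pos i0 i1 i2 h0 h1 h2
    have g0 : 3 ≠ i0 := Nat.ne_of_gt h0
    have g1 : 4 ≠ i1 := Nat.ne_of_gt h1
    have g2 : 5 ≠ i2 := Nat.ne_of_gt h2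
    have hl0 : i0 < (['b','u','g'] : List Char).length := h0
    have hl1 : i1 < (['b','o','o','m'] : List Char).length := h1
    have hl2 : i2 < (['e','d','i','t','s'] : List Char).length := h2
    by_cases m0 : c = (['b','u','g'] : List Char).getD i0 ' '
    · by_cases e0 : i0 + 1 = 3
      · have c0 : (3 ≠ i0 ∧ c = (['b','u','g'] : List Char).getD i0 ' ') = True := eq_true ⟨g0, m0⟩
        have sd : ['b','u','g'].take i0 ++ [c] = ['b','u','g'] := by rw [m0, ← take_succ_eq hl0, e0]; simp
        simp only [memALoop, c0, ite_true, ite_false]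
        rw [if_pos sd, doneAt_cons_complete m0 e0]
        exact (pick_roma (fun x hx => doneAt_ge hx) (fun x hx => doneAt_ge hx)).symm
      · have hne0 : i0 + 1 < 3 := by omega
        by_cases m1 : c = (['b','o','o','m'] : List Char).getD i1 ' '
        · by_cases e1 : i1 + 1 = 4
          · have c0 : (3 ≠ i0 ∧ c = (['b','u','g'] : List Char).getD i0 ' ') = True := eq_true ⟨g0, m0⟩
            have c1 : (4 ≠ i1 ∧ c = (['b','o','o','m'] : List Char).getD i1 ' ') = True := eq_true ⟨g1, m1⟩
            have s0 : ['b','u','g'].take i0 ++ [c] = ['b','u','g'].take (i0+1) := by rw [m0]; exact (take_succ_eq hl0).symm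
            have sd : ['b','o','o','m'].take i1 ++ [c] = ['b','o','o','m'] := by rw [m1, ← take_succ_eq hl1, e1]; simp
            simp only [memALoop, c0, c1, ite_true, ite_false]
            rw [s0]
            rw [if_neg (take_ne (pat := ['b','u','g']) hne0), if_pos sd, doneAt_cons_complete m1 e1]
            exact (pick_maxim (fun x hx => doneAt_cons_strict (fun hh => e0 hh.2) hx) (fun x hx => doneAt_ge hx)).symm
          · have hne1 : i1 + 1 < 4 := by omega
            by_cases m2 : c = (['e','d','i','t','s'] : List Char).getD i2 ' '
            · by_cases e2 : i2 + 1 = 5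
              · have c0 : (3 ≠ i0 ∧ c = (['b','u','g'] : List Char).getD i0 ' ') = True := eq_true ⟨g0, m0⟩
                have c1 : (4 ≠ i1 ∧ c = (['b','o','o','m'] : List Char).getD i1 ' ') = True := eq_true ⟨g1, m1⟩
                have c2 : (5 ≠ i2 ∧ c = (['e','d','i','t','s'] : List Char).getD i2 ' ') = True := eq_true ⟨g2, m2⟩
                have s0 : ['b','u','g'].take i0 ++ [c] = ['b','u','g'].take (i0+1) := by rw [m0]; exact (take_succ_eq hl0).symm
                have s1 : ['b','o','o','m'].take i1 ++ [c] = ['b','o','o','m'].take (i1+1) := by rw [m1]; exact (take_succ_eq hl1).symm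
                have sd : ['e','d','i','t','s'].take i2 ++ [c] = ['e','d','i','t','s'] := by rw [m2, ← take_succ_eq hl2, e2]; simp
                simp only [memALoop, c0, c1, c2, ite_true, ite_false]
                rw [s0, s1]
                rw [if_neg (take_ne (pat := ['b','u','g']) hne0), if_neg (take_ne (pat := ['b','o','o','m']) hne1), if_pos sd, doneAt_cons_complete m2 e2]
                exact (pick_danik (fun x hx => doneAt_cons_strict (fun hh => e0 hh.2) hx) (fun x hx => doneAt_cons_strict (fun hh => e1 hh.2) hx)).symm
              · have hne2 : i2 + 1 < 5 := by omega
                have c0 : (3 ≠ i0 ∧ c = (['b','u','g'] : List Char).getD i0 ' ') = True := eq_true ⟨g0, m0⟩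
                have c1 : (4 ≠ i1 ∧ c = (['b','o','o','m'] : List Char).getD i1 ' ') = True := eq_true ⟨g1, m1⟩
                have c2 : (5 ≠ i2 ∧ c = (['e','d','i','t','s'] : List Char).getD i2 ' ') = True := eq_true ⟨g2, m2⟩
                have s0 : ['b','u','g'].take i0 ++ [c] = ['b','u','g'].take (i0+1) := by rw [m0]; exact (take_succ_eq hl0).symm
                have s1 : ['b','o','o','m'].take i1 ++ [c] = ['b','o','o','m'].take (i1+1) := by rw [m1]; exact (take_succ_eq hl1).symm
                have s2 : ['e','d','i','t','s'].take i2 ++ [c] = ['e','d','i','t','s'].take (i2+1) := by rw [m2]; exact (take_succ_eq hl2).symm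
                simp only [memALoop, c0, c1, c2, ite_true, ite_false]
                rw [s0, s1, s2]
                rw [if_neg (take_ne (pat := ['b','u','g']) hne0), if_neg (take_ne (pat := ['b','o','o','m']) hne1), if_neg (take_ne (pat := ['e','d','i','t','s']) hne2), doneAt_cons_match m0 e0, doneAt_cons_match m1 e1, doneAt_cons_match m2 e2]
                exact ih (pos+1) (i0+1) (i1+1) (i2+1) hne0 hne1 hne2
            · have c0 : (3 ≠ i0 ∧ c = (['b','u','g'] : List Char).getD i0 ' ') = True := eq_true ⟨g0, m0⟩
              have c1 : (4 ≠ i1 ∧ c = (['b','o','o','m'] : List Char).getD i1 ' ') = True := eq_true ⟨g1, m1⟩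
              have c2 : (5 ≠ i2 ∧ c = (['e','d','i','t','s'] : List Char).getD i2 ' ') = False := eq_false (fun hh => m2 hh.2)
              have s0 : ['b','u','g'].take i0 ++ [c] = ['b','u','g'].take (i0+1) := by rw [m0]; exact (take_succ_eq hl0).symm
              have s1 : ['b','o','o','m'].take i1 ++ [c] = ['b','o','o','m'].take (i1+1) := by rw [m1]; exact (take_succ_eq hl1).symm
              simp only [memALoop, c0, c1, c2, ite_true, ite_false]
              rw [s0, s1]
              rw [if_neg (take_ne (pat := ['b','u','g']) hne0), if_neg (take_ne (pat := ['b','o','o','m']) hne1), if_neg (take_ne (pat := ['e','d','i','t','s']) hl2), doneAt_cons_match m0 e0, doneAt_cons_match m1 e1, doneAt_cons_nomatch m2]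
              exact ih (pos+1) (i0+1) (i1+1) i2 hne0 hne1 h2
        · by_cases m2 : c = (['e','d','i','t','s'] : List Char).getD i2 ' '
          · by_cases e2 : i2 + 1 = 5
            · have c0 : (3 ≠ i0 ∧ c = (['b','u','g'] : List Char).getD i0 ' ') = True := eq_true ⟨g0, m0⟩
              have c1 : (4 ≠ i1 ∧ c = (['b','o','o','m'] : List Char).getD i1 ' ') = False := eq_false (fun hh => m1 hh.2)
              have c2 : (5 ≠ i2 ∧ c = (['e','d','i','t','s'] : List Char).getD i2 ' ') = True := eq_true ⟨g2, m2⟩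
              have s0 : ['b','u','g'].take i0 ++ [c] = ['b','u','g'].take (i0+1) := by rw [m0]; exact (take_succ_eq hl0).symm
              have sd : ['e','d','i','t','s'].take i2 ++ [c] = ['e','d','i','t','s'] := by rw [m2, ← take_succ_eq hl2, e2]; simp
              simp only [memALoop, c0, c1, c2, ite_true, ite_false]
              rw [s0]
              rw [if_neg (take_ne (pat := ['b','u','g']) hne0), if_neg (take_ne (pat := ['b','o','o','m']) hl1), if_pos sd, doneAt_cons_complete m2 e2]
              exact (pick_danik (fun x hx => doneAt_cons_strict (fun hh => e0 hh.2) hx) (fun x hx => doneAt_cons_strict (fun hh => m1 hh.1) hx)).symm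
            · have hne2 : i2 + 1 < 5 := by omega
              have c0 : (3 ≠ i0 ∧ c = (['b','u','g'] : List Char).getD i0 ' ') = True := eq_true ⟨g0, m0⟩
              have c1 : (4 ≠ i1 ∧ c = (['b','o','o','m'] : List Char).getD i1 ' ') = False := eq_false (fun hh => m1 hh.2)
              have c2 : (5 ≠ i2 ∧ c = (['e','d','i','t','s'] : List Char).getD i2 ' ') = True := eq_true ⟨g2, m2⟩
              have s0 : ['b','u','g'].take i0 ++ [c] = ['b','u','g'].take (i0+1) := by rw [m0]; exact (take_succ_eq hl0).symm
              have s2 : ['e','d','i','t','s'].take i2 ++ [c] = ['e','d','i','t','s'].take (i2+1) := by rw [m2]; exact (take_succ_eq hl2).symm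
              simp only [memALoop, c0, c1, c2, ite_true, ite_false]
              rw [s0, s2]
              rw [if_neg (take_ne (pat := ['b','u','g']) hne0), if_neg (take_ne (pat := ['b','o','o','m']) hl1), if_neg (take_ne (pat := ['e','d','i','t','s']) hne2), doneAt_cons_match m0 e0, doneAt_cons_nomatch m1, doneAt_cons_match m2 e2]
              exact ih (pos+1) (i0+1) i1 (i2+1) hne0 h1 hne2
          · have c0 : (3 ≠ i0 ∧ c = (['b','u','g'] : List Char).getD i0 ' ') = True := eq_true ⟨g0, m0⟩
            have c1 : (4 ≠ i1 ∧ c = (['b','o','o','m'] : List Char).getD i1 ' ') = False := eq_false (fun hh => m1 hh.2)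
            have c2 : (5 ≠ i2 ∧ c = (['e','d','i','t','s'] : List Char).getD i2 ' ') = False := eq_false (fun hh => m2 hh.2)
            have s0 : ['b','u','g'].take i0 ++ [c] = ['b','u','g'].take (i0+1) := by rw [m0]; exact (take_succ_eq hl0).symm
            simp only [memALoop, c0, c1, c2, ite_true, ite_false]
            rw [s0]
            rw [if_neg (take_ne (pat := ['b','u','g']) hne0), if_neg (take_ne (pat := ['b','o','o','m']) hl1), if_neg (take_ne (pat := ['e','d','i','t','s']) hl2), doneAt_cons_match m0 e0, doneAt_cons_nomatch m1, doneAt_cons_nomatch m2]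
            exact ih (pos+1) (i0+1) i1 i2 hne0 h1 h2
    · by_cases m1 : c = (['b','o','o','m'] : List Char).getD i1 ' '
      · by_cases e1 : i1 + 1 = 4
        · have c0 : (3 ≠ i0 ∧ c = (['b','u','g'] : List Char).getD i0 ' ') = False := eq_false (fun hh => m0 hh.2)
          have c1 : (4 ≠ i1 ∧ c = (['b','o','o','m'] : List Char).getD i1 ' ') = True := eq_true ⟨g1, m1⟩
          have sd : ['b','o','o','m'].take i1 ++ [c] = ['b','o','o','m'] := by rw [m1, ← take_succ_eq hl1, e1]; simp
          simp only [memALoop, c0, c1, ite_true, ite_false]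
          rw [if_neg (take_ne (pat := ['b','u','g']) hl0), if_pos sd, doneAt_cons_complete m1 e1]
          exact (pick_maxim (fun x hx => doneAt_cons_strict (fun hh => m0 hh.1) hx) (fun x hx => doneAt_ge hx)).symm
        · have hne1 : i1 + 1 < 4 := by omega
          by_cases m2 : c = (['e','d','i','t','s'] : List Char).getD i2 ' '
          · by_cases e2 : i2 + 1 = 5
            · have c0 : (3 ≠ i0 ∧ c = (['b','u','g'] : List Char).getD i0 ' ') = False := eq_false (fun hh => m0 hh.2)
              have c1 : (4 ≠ i1 ∧ c = (['b','o','o','m'] : List Char).getD i1 ' ') = True := eq_true ⟨g1, m1⟩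
              have c2 : (5 ≠ i2 ∧ c = (['e','d','i','t','s'] : List Char).getD i2 ' ') = True := eq_true ⟨g2, m2⟩
              have s1 : ['b','o','o','m'].take i1 ++ [c] = ['b','o','o','m'].take (i1+1) := by rw [m1]; exact (take_succ_eq hl1).symm
              have sd : ['e','d','i','t','s'].take i2 ++ [c] = ['e','d','i','t','s'] := by rw [m2, ← take_succ_eq hl2, e2]; simp
              simp only [memALoop, c0, c1, c2, ite_true, ite_false]
              rw [s1]
              rw [if_neg (take_ne (pat := ['b','u','g']) hl0), if_neg (take_ne (pat := ['b','o','o','m']) hne1), if_pos sd, doneAt_cons_complete m2 e2]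
              exact (pick_danik (fun x hx => doneAt_cons_strict (fun hh => m0 hh.1) hx) (fun x hx => doneAt_cons_strict (fun hh => e1 hh.2) hx)).symm
            · have hne2 : i2 + 1 < 5 := by omega
              have c0 : (3 ≠ i0 ∧ c = (['b','u','g'] : List Char).getD i0 ' ') = False := eq_false (fun hh => m0 hh.2)
              have c1 : (4 ≠ i1 ∧ c = (['b','o','o','m'] : List Char).getD i1 ' ') = True := eq_true ⟨g1, m1⟩
              have c2 : (5 ≠ i2 ∧ c = (['e','d','i','t','s'] : List Char).getD i2 ' ') = True := eq_true ⟨g2, m2⟩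
              have s1 : ['b','o','o','m'].take i1 ++ [c] = ['b','o','o','m'].take (i1+1) := by rw [m1]; exact (take_succ_eq hl1).symm
              have s2 : ['e','d','i','t','s'].take i2 ++ [c] = ['e','d','i','t','s'].take (i2+1) := by rw [m2]; exact (take_succ_eq hl2).symm
              simp only [memALoop, c0, c1, c2, ite_true, ite_false]
              rw [s1, s2]
              rw [if_neg (take_ne (pat := ['b','u','g']) hl0), if_neg (take_ne (pat := ['b','o','o','m']) hne1), if_neg (take_ne (pat := ['e','d','i','t','s']) hne2), doneAt_cons_nomatch m0, doneAt_cons_match m1 e1, doneAt_cons_match m2 e2]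
              exact ih (pos+1) i0 (i1+1) (i2+1) h0 hne1 hne2
          · have c0 : (3 ≠ i0 ∧ c = (['b','u','g'] : List Char).getD i0 ' ') = False := eq_false (fun hh => m0 hh.2)
            have c1 : (4 ≠ i1 ∧ c = (['b','o','o','m'] : List Char).getD i1 ' ') = True := eq_true ⟨g1, m1⟩
            have c2 : (5 ≠ i2 ∧ c = (['e','d','i','t','s'] : List Char).getD i2 ' ') = False := eq_false (fun hh => m2 hh.2)
            have s1 : ['b','o','o','m'].take i1 ++ [c] = ['b','o','o','m'].take (i1+1) := by rw [m1]; exact (take_succ_eq hl1).symm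
            simp only [memALoop, c0, c1, c2, ite_true, ite_false]
            rw [s1]
            rw [if_neg (take_ne (pat := ['b','u','g']) hl0), if_neg (take_ne (pat := ['b','o','o','m']) hne1), if_neg (take_ne (pat := ['e','d','i','t','s']) hl2), doneAt_cons_nomatch m0, doneAt_cons_match m1 e1, doneAt_cons_nomatch m2]
            exact ih (pos+1) i0 (i1+1) i2 h0 hne1 h2
      · by_cases m2 : c = (['e','d','i','t','s'] : List Char).getD i2 ' '
        · by_cases e2 : i2 + 1 = 5
          · have c0 : (3 ≠ i0 ∧ c = (['b','u','g'] : List Char).getD i0 ' ') = False := eq_false (fun hh => m0 hh.2)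
            have c1 : (4 ≠ i1 ∧ c = (['b','o','o','m'] : List Char).getD i1 ' ') = False := eq_false (fun hh => m1 hh.2)
            have c2 : (5 ≠ i2 ∧ c = (['e','d','i','t','s'] : List Char).getD i2 ' ') = True := eq_true ⟨g2, m2⟩
            have sd : ['e','d','i','t','s'].take i2 ++ [c] = ['e','d','i','t','s'] := by rw [m2, ← take_succ_eq hl2, e2]; simp
            simp only [memALoop, c0, c1, c2, ite_true, ite_false]
            rw [if_neg (take_ne (pat := ['b','u','g']) hl0), if_neg (take_ne (pat := ['b','o','o','m']) hl1), if_pos sd, doneAt_cons_complete m2 e2]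
            exact (pick_danik (fun x hx => doneAt_cons_strict (fun hh => m0 hh.1) hx) (fun x hx => doneAt_cons_strict (fun hh => m1 hh.1) hx)).symm
          · have hne2 : i2 + 1 < 5 := by omega
            have c0 : (3 ≠ i0 ∧ c = (['b','u','g'] : List Char).getD i0 ' ') = False := eq_false (fun hh => m0 hh.2)
            have c1 : (4 ≠ i1 ∧ c = (['b','o','o','m'] : List Char).getD i1 ' ') = False := eq_false (fun hh => m1 hh.2)
            have c2 : (5 ≠ i2 ∧ c = (['e','d','i','t','s'] : List Char).getD i2 ' ') = True := eq_true ⟨g2, m2⟩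
            have s2 : ['e','d','i','t','s'].take i2 ++ [c] = ['e','d','i','t','s'].take (i2+1) := by rw [m2]; exact (take_succ_eq hl2).symm
            simp only [memALoop, c0, c1, c2, ite_true, ite_false]
            rw [s2]
            rw [if_neg (take_ne (pat := ['b','u','g']) hl0), if_neg (take_ne (pat := ['b','o','o','m']) hl1), if_neg (take_ne (pat := ['e','d','i','t','s']) hne2), doneAt_cons_nomatch m0, doneAt_cons_nomatch m1, doneAt_cons_match m2 e2]
            exact ih (pos+1) i0 i1 (i2+1) h0 h1 hne2
        · have c0 : (3 ≠ i0 ∧ c = (['b','u','g'] : List Char).getD i0 ' ') = False := eq_false (fun hh => m0 hh.2)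
          have c1 : (4 ≠ i1 ∧ c = (['b','o','o','m'] : List Char).getD i1 ' ') = False := eq_false (fun hh => m1 hh.2)
          have c2 : (5 ≠ i2 ∧ c = (['e','d','i','t','s'] : List Char).getD i2 ' ') = False := eq_false (fun hh => m2 hh.2)
          simp only [memALoop, c0, c1, c2, ite_true, ite_false]
          rw [if_neg (take_ne (pat := ['b','u','g']) hl0), if_neg (take_ne (pat := ['b','o','o','m']) hl1), if_neg (take_ne (pat := ['e','d','i','t','s']) hl2), doneAt_cons_nomatch m0, doneAt_cons_nomatch m1, doneAt_cons_nomatch m2]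
          exact ih (pos+1) i0 i1 i2 h0 h1 h2

-- ===== VERDICT (by name: the statement is the Claim_ definition above) =====
theorem memesorting_spec : Claim_equal_memesorting := by
  intro meme _
  unfold Spec_memesorting memesorting memesorting_alt
  exact memALoop_eq_pick (PySem.Str.lower meme).toList 0 0 0 0 (by omega) (by omega) (by omega)
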